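-- pv_equiv track=rewrite | github.com/eytree/trace-scope | tools/extract_modular.py | _skip_to_endif
-- ===== SOURCE A (Python) =====
-- from typing import Dict, List
--
-- def _skip_to_endif(lines: List[str], start_idx: int) -> int:
--     """Skip to matching #endif"""
--     depth = 1
--     i = start_idx + 1
--
--     while i < len(lines) and depth > 0:
--         line = lines[i].strip()
--         if line.startswith('#if'):
--             depth += 1
--         elif line.startswith('#endif'):
--             depth -= 1
--         i += 1
--
--     return i
-- ===== SOURCE B (Python) =====
-- from typing import Dict, List
--
-- def _skip_to_endif(lines: List[str], start_idx: int) -> int: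
--     """Skip to matching #endif (recursive descent over nested #if blocks)."""
--     n = len(lines)
--     i = start_idx + 1
--     while i < n:
--         line = lines[i].strip()
--         if line.startswith('#if'):
--             i = _skip_to_endif(lines, i)
--         elif line.startswith('#endif'):
--             return i + 1
--         else:
--             i += 1
--     return i
-- ===== Notes on version B (the rewrite author's own statement) =====
-- stated objective: alternative
-- what changed: Replaces A's flat depth counter with recursive descent: each nested '#if' block is skipped by a recursive call to the function itself, and an unmatched '#endif' returns directly.
import Mathlib
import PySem

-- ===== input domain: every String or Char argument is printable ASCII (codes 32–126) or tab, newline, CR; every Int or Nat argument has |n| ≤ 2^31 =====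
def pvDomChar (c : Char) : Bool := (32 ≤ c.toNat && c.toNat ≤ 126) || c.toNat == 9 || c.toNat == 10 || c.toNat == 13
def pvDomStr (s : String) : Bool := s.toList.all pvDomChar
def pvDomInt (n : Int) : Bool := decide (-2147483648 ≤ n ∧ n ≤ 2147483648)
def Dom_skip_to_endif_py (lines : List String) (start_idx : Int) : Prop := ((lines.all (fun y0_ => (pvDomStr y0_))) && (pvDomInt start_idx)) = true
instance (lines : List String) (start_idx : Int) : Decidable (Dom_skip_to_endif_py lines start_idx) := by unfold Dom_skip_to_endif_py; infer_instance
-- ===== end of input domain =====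

-- B replaces A's flat depth counter by recursive descent: a nested '#if' block is skipped
-- by a recursive call to the function itself; 'alternative' objective, same cost.

-- ===== PORT A =====
-- A's while loop over state (i, depth); pyGet? none = IndexError (excluded by Pre_), 0 is a junk value there.
def pvSkipA (lines : List String) (i : Int) (depth : Int) : Int :=
  if h : i < (lines.length : Int) ∧ 0 < depth then
    match PySem.List.pyGet? lines i with
    | none => 0
    | some line =>
      let s := PySem.Str.strip line
      let depth' := if PySem.Str.startswith s "#if" then depth + 1
        else if PySem.Str.startswith s "#endif" then depth - 1
        else depth
      pvSkipA lines (i + 1) depth'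
  else i
termination_by ((lines.length : Int) - i).toNat
decreasing_by omega

def skip_to_endif_py (lines : List String) (start_idx : Int) : Int :=
  pvSkipA lines (start_idx + 1) 1

-- ===== PORT B =====
-- B's while loop from index i; on '#if' the inner block is skipped by a recursive call
-- (pvSkipB fuel lines (i+1), i.e. _skip_to_endif(lines, i)) and the loop resumes at its result;
-- fuel is only a totality guard (never exhausted on inputs in Pre_); 0 is the junk IndexError value.
def pvSkipB (fuel : Nat) (lines : List String) (i : Int) : Int :=
  match fuel with
  | 0 => i
  | fuel + 1 =>
    if i < (lines.length : Int) then
      match PySem.List.pyGet? lines i with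
      | none => 0
      | some line =>
        let s := PySem.Str.strip line
        if PySem.Str.startswith s "#if" then pvSkipB fuel lines (pvSkipB fuel lines (i + 1))
        else if PySem.Str.startswith s "#endif" then i + 1
        else pvSkipB fuel lines (i + 1)
    else i

def skip_to_endif_py_alt (lines : List String) (start_idx : Int) : Int :=
  pvSkipB (((lines.length : Int) - start_idx).toNat + 1) lines (start_idx + 1)

-- ===== PRECONDITION & SPEC =====
-- Pre_ excludes exactly the inputs where A raises IndexError (first scanned index below -len(lines)).
def Pre_skip_to_endif_py (lines : List String) (start_idx : Int) : Prop :=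
  -(lines.length : Int) ≤ start_idx + 1
instance (lines : List String) (start_idx : Int) : Decidable (Pre_skip_to_endif_py lines start_idx) := by
  unfold Pre_skip_to_endif_py; infer_instance

def pvWitness_skip_to_endif_py : List String × Int := (["int x;", "#endif"], 0)

def Spec_skip_to_endif_py (lines : List String) (start_idx : Int) (out : Int) : Prop := out = skip_to_endif_py_alt lines start_idx
instance (lines : List String) (start_idx : Int) (out : Int) : Decidable (Spec_skip_to_endif_py lines start_idx out) := by unfold Spec_skip_to_endif_py; infer_instance

-- ===== CLAIM (what is proved, stated in full; the proofs are below) =====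
def Claim_equal_skip_to_endif_py : Prop := ∀ (lines : List String) (start_idx : Int), Dom_skip_to_endif_py lines start_idx → Pre_skip_to_endif_py lines start_idx → Spec_skip_to_endif_py lines start_idx (skip_to_endif_py lines start_idx)

-- ===== LEMMAS AND PROOFS =====

-- in range ⇒ pyGet? returns some element
theorem pvGet_some (lines : List String) (i : Int) (h1 : -(lines.length : Int) ≤ i)
    (h2 : i < (lines.length : Int)) : ∃ line, PySem.List.pyGet? lines i = some line := by
  cases h : PySem.List.pyGet? lines i with
  | some line => exact ⟨line, rfl⟩
  | none =>
    rw [PySem.List.pyGet?_eq_none_iff] at h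
    exact absurd ⟨h1, h2⟩ h

-- A's loop never moves the index backwards
theorem skipA_ge (lines : List String) (i depth : Int) : i ≤ pvSkipA lines i depth := by
  rw [pvSkipA]
  split
  · rename_i h
    cases hg : PySem.List.pyGet? lines i with
    | none =>
      rw [PySem.List.pyGet?_eq_none_iff] at hg
      simp only []
      have : ¬ (-(lines.length : Int) ≤ i ∧ i < (lines.length : Int)) := hg
      omega
    | some line =>
      simp only []
      have := skipA_ge lines (i + 1)
        (if PySem.Str.startswith (PySem.Str.strip line) "#if" then depth + 1
         else if PySem.Str.startswith (PySem.Str.strip line) "#endif" then depth - 1 else depth)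
      omega
  · omega
termination_by ((lines.length : Int) - i).toNat
decreasing_by omega

-- depth decomposition: scanning at depth d+1 = first find one matching #endif, then scan at depth d
theorem skipA_decomp (lines : List String) : ∀ (m : Nat) (i d : Int),
    ((lines.length : Int) - i).toNat ≤ m → -(lines.length : Int) ≤ i → 1 ≤ d →
    pvSkipA lines i (d + 1) = pvSkipA lines (pvSkipA lines i 1) d := by
  intro m
  induction m with
  | zero =>
    intro i d hm h1 hd
    have hinner : pvSkipA lines i 1 = i := by rw [pvSkipA, dif_neg (by omega)]
    rw [pvSkipA, dif_neg (by omega), hinner, pvSkipA, dif_neg (by omega)]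
  | succ m ih =>
    intro i d hm h1 hd
    by_cases hi : i < (lines.length : Int)
    · obtain ⟨line, hg⟩ := pvGet_some lines i h1 hi
      have hstep : ∀ d' : Int, 0 < d' → pvSkipA lines i d' =
          pvSkipA lines (i + 1)
            (if PySem.Str.startswith (PySem.Str.strip line) "#if" then d' + 1
             else if PySem.Str.startswith (PySem.Str.strip line) "#endif" then d' - 1 else d') := by
        intro d' hd'
        rw [pvSkipA, dif_pos ⟨hi, hd'⟩, hg]
      have hm' : ((lines.length : Int) - (i + 1)).toNat ≤ m := by omega
      have h1' : -(lines.length : Int) ≤ i + 1 := by omega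
      by_cases hif : PySem.Str.startswith (PySem.Str.strip line) "#if"
      · rw [hstep (d + 1) (by omega), hstep 1 (by omega)]
        simp only [hif, if_pos]
        have hji : i + 1 ≤ pvSkipA lines (i + 1) 1 := skipA_ge lines (i + 1) 1
        have e1 : pvSkipA lines (i + 1) (d + 1 + 1) = pvSkipA lines (pvSkipA lines (i + 1) 1) (d + 1) :=
          ih (i + 1) (d + 1) hm' h1' (by omega)
        have e3 : pvSkipA lines (i + 1) (1 + 1) = pvSkipA lines (pvSkipA lines (i + 1) 1) 1 :=
          ih (i + 1) 1 hm' h1' (by omega)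
        rw [e1, e3]
        exact ih (pvSkipA lines (i + 1) 1) d (by omega) (by omega) hd
      · by_cases hend : PySem.Str.startswith (PySem.Str.strip line) "#endif"
        · rw [hstep (d + 1) (by omega), hstep 1 (by omega)]
          simp only [hif, hend, Bool.false_eq_true, if_false, eq_self_iff_true, if_true]
          rw [show d + 1 - 1 = d from by ring, show (1 : Int) - 1 = 0 from by ring,
            show pvSkipA lines (i + 1) 0 = i + 1 from by rw [pvSkipA, dif_neg (by omega)]]
        · rw [hstep (d + 1) (by omega), hstep 1 (by omega)]
          simp only [hif, hend, Bool.false_eq_true, if_false]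
          exact ih (i + 1) d hm' h1' hd
    · have hinner : pvSkipA lines i 1 = i := by rw [pvSkipA, dif_neg (by omega)]
      rw [pvSkipA, dif_neg (by omega), hinner, pvSkipA, dif_neg (by omega)]

-- with enough fuel, B's recursive descent equals A's depth-1 scan
theorem skipA_eq_skipB (lines : List String) : ∀ (f : Nat) (i : Int),
    -(lines.length : Int) ≤ i → ((lines.length : Int) - i).toNat < f →
    pvSkipA lines i 1 = pvSkipB f lines i := by
  intro f
  induction f with
  | zero => intro i _ hf; omega
  | succ f ih =>
    intro i h1 hf
    by_cases hi : i < (lines.length : Int)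
    · obtain ⟨line, hg⟩ := pvGet_some lines i h1 hi
      rw [pvSkipA, dif_pos ⟨hi, by omega⟩, hg]
      rw [pvSkipB, if_pos hi, hg]
      simp only []
      have h1' : -(lines.length : Int) ≤ i + 1 := by omega
      have hf' : ((lines.length : Int) - (i + 1)).toNat < f := by omega
      by_cases hif : PySem.Str.startswith (PySem.Str.strip line) "#if"
      · simp only [hif, if_pos]
        have e1 : pvSkipA lines (i + 1) 1 = pvSkipB f lines (i + 1) := ih (i + 1) h1' hf'
        have hji : i + 1 ≤ pvSkipA lines (i + 1) 1 := skipA_ge lines (i + 1) 1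
        have e2 : pvSkipA lines (i + 1) (1 + 1) = pvSkipA lines (pvSkipA lines (i + 1) 1) 1 :=
          skipA_decomp lines (((lines.length : Int) - (i + 1)).toNat) (i + 1) 1 (le_refl _) h1' (by omega)
        rw [e2, ← e1]
        exact ih (pvSkipA lines (i + 1) 1) (by omega) (by omega)
      · by_cases hend : PySem.Str.startswith (PySem.Str.strip line) "#endif"
        · simp only [hif, hend, Bool.false_eq_true, if_false, eq_self_iff_true, if_true]
          rw [show (1 : Int) - 1 = 0 from by ring,
            show pvSkipA lines (i + 1) 0 = i + 1 from by rw [pvSkipA, dif_neg (by omega)]]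
        · simp only [hif, hend, Bool.false_eq_true, if_false]
          exact ih (i + 1) h1' hf'
    · rw [pvSkipA, dif_neg (by omega)]
      rw [pvSkipB, if_neg hi]

-- ===== VERDICT (by name: the statement is the Claim_ definition above) =====
theorem skip_to_endif_py_spec : Claim_equal_skip_to_endif_py := by
  intro lines start_idx _ hpre
  unfold Spec_skip_to_endif_py skip_to_endif_py skip_to_endif_py_alt
  exact skipA_eq_skipB lines (((lines.length : Int) - start_idx).toNat + 1) (start_idx + 1) hpre (by omega)
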